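-- pv_equiv track=rewrite | github.com/modlix-india/Adzump-AI | services/optimize_ad.py | choose_fallback_locations
-- ===== SOURCE A (Python) =====
-- from typing import List, Dict, Any
--
-- def is_valid_geo_target(obj: Dict[str, Any]) -> bool:
--     try:
--         g = obj.get("geoTargetConstant") if isinstance(obj, dict) else None
--         return bool(g and g.get("id") and g.get("name"))
--     except Exception:
--         return False
--
-- def geo_id_name(gobj: Dict[str, Any]):
--     g = gobj.get("geoTargetConstant", {})
--     return str(g.get("id")), g.get("name")
--
-- def choose_fallback_locations(original_locations: List[Dict[str, Any]], n: int = 3) -> List[Dict[str, Any]]: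
--     """
--     Heuristic fallback:
--     - Prioritize original locations if they appear in priority list.
--     - Fill remaining slots from generic strong markets if missing.
--     - Returns up to n geoTargetConstant-wrapped location dicts.
--     """
--     priority_names = ["Bengaluru", "Indiranagar", "Hyderabad", "Chennai", "Coimbatore", "Mysore"]
--     chosen = []
--     seen_ids = set()
--
--     # Step 1: keep originals that match priority list
--     for name in priority_names:
--         for loc in original_locations:
--             if not is_valid_geo_target(loc):
--                 continue
--             _, loc_name = geo_id_name(loc)
--             if loc_name and name.lower() in loc_name.lower():
--                 loc_id, _ = geo_id_name(loc)
--                 if loc_id not in seen_ids: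
--                     chosen.append(loc)
--                     seen_ids.add(loc_id)
--                 if len(chosen) >= n:
--                     return chosen
--
--     # Step 2: add other valid originals
--     for loc in original_locations:
--         if not is_valid_geo_target(loc):
--             continue
--         loc_id, _ = geo_id_name(loc)
--         if loc_id not in seen_ids:
--             chosen.append(loc)
--             seen_ids.add(loc_id)
--         if len(chosen) >= n:
--             return chosen
--
--     # Step 3: add generic fallback candidates
--     generic_candidates = [
--         {"geoTargetConstant": {"id": "1019234", "name": "Hyderabad", "countryCode": "IN", "targetType": "City"}},
--         {"geoTargetConstant": {"id": "1007770", "name": "Mysore", "countryCode": "IN", "targetType": "City"}},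
--         {"geoTargetConstant": {"id": "1029931", "name": "Coimbatore", "countryCode": "IN", "targetType": "City"}}
--     ]
--     for cand in generic_candidates:
--         cid, _ = geo_id_name(cand)
--         if cid not in seen_ids:
--             chosen.append(cand)
--             seen_ids.add(cid)
--         if len(chosen) >= n:
--             break
--
--     return chosen
-- ===== SOURCE B (Python) =====
-- from typing import List, Dict, Any
--
-- def is_valid_geo_target(obj: Dict[str, Any]) -> bool:
--     try:
--         g = obj.get("geoTargetConstant") if isinstance(obj, dict) else None
--         return bool(g and g.get("id") and g.get("name"))
--     except Exception:
--         return False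
--
-- def geo_id_name(gobj: Dict[str, Any]):
--     g = gobj.get("geoTargetConstant", {})
--     return str(g.get("id")), g.get("name")
--
-- def choose_fallback_locations(original_locations: List[Dict[str, Any]], n: int = 3) -> List[Dict[str, Any]]:
--     """Rank each valid location once, bucket by rank, then one dedup pass collecting up to n."""
--     priority_names = ["Bengaluru", "Indiranagar", "Hyderabad", "Chennai", "Coimbatore", "Mysore"]
--     lowered = [p.lower() for p in priority_names]
--
--     # one pass: precompute each valid location's priority rank
--     ranked = []
--     for loc in original_locations:
--         if is_valid_geo_target(loc):
--             _, name = geo_id_name(loc)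
--             lname = name.lower()
--             rank = len(lowered)
--             for i, p in enumerate(lowered):
--                 if p in lname:
--                     rank = i
--                     break
--             ranked.append((rank, loc))
--
--     generic_candidates = [
--         {"geoTargetConstant": {"id": "1019234", "name": "Hyderabad", "countryCode": "IN", "targetType": "City"}},
--         {"geoTargetConstant": {"id": "1007770", "name": "Mysore", "countryCode": "IN", "targetType": "City"}},
--         {"geoTargetConstant": {"id": "1029931", "name": "Coimbatore", "countryCode": "IN", "targetType": "City"}}
--     ]
--
--     ordered = [loc for r in range(len(lowered) + 1) for (rr, loc) in ranked if rr == r]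
--     ordered += generic_candidates
--
--     # single dedup pass keeping first occurrence per id, stopping once n are collected
--     chosen, seen = [], set()
--     for loc in ordered:
--         gid, _ = geo_id_name(loc)
--         if gid not in seen:
--             seen.add(gid)
--             chosen.append(loc)
--         if len(chosen) >= n:
--             break
--     return chosen
-- ===== Notes on version B (the rewrite author's own statement) =====
-- stated objective: alternative
-- what changed: A's three sequential loops (a rescan of all locations per priority name with inline seen-id dedup and early returns) are replaced by a pipeline: one pass computes each valid location's priority rank, locations are collected in rank buckets, then a single dedup-by-id pass over the bucketed order plus the generic candidates collects up to n results.
import Mathlib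
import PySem

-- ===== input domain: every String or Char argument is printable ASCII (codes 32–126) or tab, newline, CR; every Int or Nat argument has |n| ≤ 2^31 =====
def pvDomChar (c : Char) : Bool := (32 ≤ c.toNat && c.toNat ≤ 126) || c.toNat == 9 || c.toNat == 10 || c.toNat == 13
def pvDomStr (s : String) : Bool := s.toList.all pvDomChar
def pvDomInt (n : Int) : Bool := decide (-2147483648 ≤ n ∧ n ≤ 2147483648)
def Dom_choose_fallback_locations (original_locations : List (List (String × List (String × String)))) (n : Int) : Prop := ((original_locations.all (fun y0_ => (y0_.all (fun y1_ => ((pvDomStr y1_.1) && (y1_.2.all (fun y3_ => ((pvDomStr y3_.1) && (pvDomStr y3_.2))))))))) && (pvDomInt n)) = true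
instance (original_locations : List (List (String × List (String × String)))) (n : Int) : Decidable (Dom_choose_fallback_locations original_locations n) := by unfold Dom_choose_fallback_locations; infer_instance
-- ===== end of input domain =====

-- B replaces A's per-priority-name rescans (with inline dedup and early returns) by a single
-- rank-precomputation pass, bucketing by rank, then one dedup pass collecting up to n (objective: alternative).

abbrev PvLoc := List (String × List (String × String))

-- ===== PORT A =====
-- shared module helpers (used by both Python versions)
def pvTruthy : Option String → Bool
  | none => false
  | some s => !(s == "")

def pv_is_valid_geo_target (obj : PvLoc) : Bool :=
  match PySem.Dict.get? ⟨obj⟩ "geoTargetConstant" with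
  | none => false
  | some g => !(g == []) && pvTruthy (PySem.Dict.get? ⟨g⟩ "id") && pvTruthy (PySem.Dict.get? ⟨g⟩ "name")

-- str(g.get("id")) is the id string itself, or "None" when the key is absent (exact for string values)
def pv_geo_id_name (gobj : PvLoc) : String × Option String :=
  let g := PySem.Dict.getD ⟨gobj⟩ "geoTargetConstant" []
  ((PySem.Dict.get? ⟨g⟩ "id").getD "None", PySem.Dict.get? ⟨g⟩ "name")

def pvPriorityNames : List String := ["Bengaluru", "Indiranagar", "Hyderabad", "Chennai", "Coimbatore", "Mysore"]

def pvGenericCandidates : List PvLoc :=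
  [ [("geoTargetConstant", [("id","1019234"),("name","Hyderabad"),("countryCode","IN"),("targetType","City")])]
  , [("geoTargetConstant", [("id","1007770"),("name","Mysore"),("countryCode","IN"),("targetType","City")])]
  , [("geoTargetConstant", [("id","1029931"),("name","Coimbatore"),("countryCode","IN"),("targetType","City")])] ]

-- "loc_name and name.lower() in loc_name.lower()"
def pvNameCond (nm : String) : Option String → Bool
  | none => false
  | some s => !(s == "") && PySem.Str.isIn (PySem.Str.lower nm) (PySem.Str.lower s)

-- Step 1 inner loop ("for loc in original_locations" under one priority name)
def pvStep1Inner (n : Int) (nm : String) :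
    List PvLoc → List PvLoc × PySem.Set String → (List PvLoc × PySem.Set String) ⊕ List PvLoc
  | [], st => .inl st
  | loc :: rest, st =>
    if !(pv_is_valid_geo_target loc) then pvStep1Inner n nm rest st
    else if pvNameCond nm (pv_geo_id_name loc).2 then
      let locId := (pv_geo_id_name loc).1
      let st' := if PySem.Set.contains st.2 locId then st else (st.1 ++ [loc], PySem.Set.add st.2 locId)
      if n ≤ (st'.1.length : Int) then .inr st'.1 else pvStep1Inner n nm rest st'
    else pvStep1Inner n nm rest st

-- Step 1 outer loop ("for name in priority_names")
def pvStep1 (n : Int) (locs : List PvLoc) :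
    List String → List PvLoc × PySem.Set String → (List PvLoc × PySem.Set String) ⊕ List PvLoc
  | [], st => .inl st
  | nm :: rest, st =>
    match pvStep1Inner n nm locs st with
    | .inr r => .inr r
    | .inl st' => pvStep1 n locs rest st'

-- Step 2
def pvStep2 (n : Int) :
    List PvLoc → List PvLoc × PySem.Set String → (List PvLoc × PySem.Set String) ⊕ List PvLoc
  | [], st => .inl st
  | loc :: rest, st =>
    if !(pv_is_valid_geo_target loc) then pvStep2 n rest st
    else
      let locId := (pv_geo_id_name loc).1
      let st' := if PySem.Set.contains st.2 locId then st else (st.1 ++ [loc], PySem.Set.add st.2 locId)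
      if n ≤ (st'.1.length : Int) then .inr st'.1 else pvStep2 n rest st'

-- Step 3 ("break" then return chosen)
def pvStep3 (n : Int) : List PvLoc → List PvLoc × PySem.Set String → List PvLoc
  | [], st => st.1
  | cand :: rest, st =>
    let cid := (pv_geo_id_name cand).1
    let st' := if PySem.Set.contains st.2 cid then st else (st.1 ++ [cand], PySem.Set.add st.2 cid)
    if n ≤ (st'.1.length : Int) then st'.1 else pvStep3 n rest st'

def choose_fallback_locations (original_locations : List (List (String × List (String × String)))) (n : Int) : List (List (String × List (String × String))) :=
  match pvStep1 n original_locations pvPriorityNames ([], PySem.Set.empty) with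
  | .inr r => r
  | .inl st =>
    match pvStep2 n original_locations st with
    | .inr r => r
    | .inl st' => pvStep3 n pvGenericCandidates st'

-- ===== PORT B =====
-- body of B's dedup loop ("if gid not in seen: seen.add; chosen.append")
def pvBstep (st : List PvLoc × PySem.Set String) (loc : PvLoc) : List PvLoc × PySem.Set String :=
  let gid := (pv_geo_id_name loc).1
  if PySem.Set.contains st.2 gid then st else (st.1 ++ [loc], PySem.Set.add st.2 gid)

-- B's final loop: dedup pass that breaks once len(chosen) >= n
def pvBloop (n : Int) : List PvLoc → List PvLoc × PySem.Set String → List PvLoc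
  | [], st => st.1
  | loc :: rest, st =>
    let st' := pvBstep st loc
    if n ≤ (st'.1.length : Int) then st'.1 else pvBloop n rest st'

-- "rank = len(lowered); for i, p in enumerate(lowered): if p in lname: rank = i; break"
def pvRankLoop (lname : String) : List (Int × String) → Int → Int
  | [], rank => rank
  | (i, p) :: rest, rank => if PySem.Str.isIn p lname then i else pvRankLoop lname rest rank

def choose_fallback_locations_alt (original_locations : List (List (String × List (String × String)))) (n : Int) : List (List (String × List (String × String))) :=
  let lowered := pvPriorityNames.map PySem.Str.lower
  let ranked := original_locations.foldl (fun acc loc =>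
      if pv_is_valid_geo_target loc then
        acc ++ [(pvRankLoop (PySem.Str.lower ((pv_geo_id_name loc).2.getD ""))
                  (PySem.List.enumerate lowered 0) ((lowered.length : Int)), loc)]
      else acc) []
  let ordered := (PySem.List.pyRange 0 ((lowered.length : Int) + 1) 1).flatMap
      (fun r => (ranked.filter (fun p => p.1 == r)).map (fun p => p.2))
  let ordered2 := ordered ++ pvGenericCandidates
  pvBloop n ordered2 ([], PySem.Set.empty)

-- ===== PRECONDITION & SPEC =====
def Spec_choose_fallback_locations (original_locations : List (List (String × List (String × String)))) (n : Int) (out : List (List (String × List (String × String)))) : Prop := out = choose_fallback_locations_alt original_locations n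
instance (original_locations : List (List (String × List (String × String)))) (n : Int) (out : List (List (String × List (String × String)))) : Decidable (Spec_choose_fallback_locations original_locations n out) := by unfold Spec_choose_fallback_locations; infer_instance

-- ===== CLAIM (what is proved, stated in full; the proofs are below) =====
def Claim_equal_choose_fallback_locations : Prop := ∀ (original_locations : List (List (String × List (String × String)))) (n : Int), Dom_choose_fallback_locations original_locations n → Spec_choose_fallback_locations original_locations n (choose_fallback_locations original_locations n)

-- ===== LEMMAS AND PROOFS =====

-- proof-side abbreviations
def pvGid (l : PvLoc) : String := (pv_geo_id_name l).1
def pvV (L : List PvLoc) : List PvLoc := L.filter pv_is_valid_geo_target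
def pvLname (l : PvLoc) : String := PySem.Str.lower ((pv_geo_id_name l).2.getD "")
def pvLow : List String := pvPriorityNames.map PySem.Str.lower
def pvRankN (l : PvLoc) : Nat := pvLow.findIdx (fun p => PySem.Str.isIn p (pvLname l))
-- A-side chunk i (locations matching priority name i) and B-side chunk i (locations of rank i)
def pvSA (L : List PvLoc) (i : Nat) : List PvLoc :=
  (pvV L).filter (fun l => PySem.Str.isIn (pvLow.getD i "") (pvLname l))
def pvSBn (L : List PvLoc) (i : Nat) : List PvLoc := (pvV L).filter (fun l => pvRankN l == i)

-- the uniform early-return dedup processor both programs' loops instantiate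
def pvProc (n : Int) : List PvLoc → List PvLoc × PySem.Set String → (List PvLoc × PySem.Set String) ⊕ List PvLoc
  | [], st => .inl st
  | l :: rest, st =>
    let st' := pvBstep st l
    if n ≤ (st'.1.length : Int) then .inr st'.1 else pvProc n rest st'

def pvRes : (List PvLoc × PySem.Set String) ⊕ List PvLoc → List PvLoc
  | .inl st => st.1
  | .inr r => r

def pvStreamA (L : List PvLoc) : List PvLoc :=
  ((List.range 6).flatMap (pvSA L)) ++ pvV L ++ pvGenericCandidates
def pvStreamB (L : List PvLoc) : List PvLoc :=
  ((List.range 7).flatMap (pvSBn L)) ++ pvGenericCandidates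

def pvInit : List PvLoc × PySem.Set String := ([], PySem.Set.empty)

-- one-step unfolding equations, phrased through pvBstep
lemma pvProc_cons (n : Int) (l : PvLoc) (rest : List PvLoc) (st : List PvLoc × PySem.Set String) :
    pvProc n (l :: rest) st =
      if n ≤ ((pvBstep st l).1.length : Int) then Sum.inr (pvBstep st l).1
      else pvProc n rest (pvBstep st l) := rfl

lemma pvStep1Inner_cons_false (n : Int) (nm : String) (l : PvLoc) (locs : List PvLoc)
    (st : List PvLoc × PySem.Set String) (hv : pv_is_valid_geo_target l = false) :
    pvStep1Inner n nm (l :: locs) st = pvStep1Inner n nm locs st := by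
  have hrfl : pvStep1Inner n nm (l :: locs) st =
      if !pv_is_valid_geo_target l then pvStep1Inner n nm locs st
      else if pvNameCond nm (pv_geo_id_name l).2 then
        (if n ≤ ((pvBstep st l).1.length : Int) then Sum.inr (pvBstep st l).1
         else pvStep1Inner n nm locs (pvBstep st l))
      else pvStep1Inner n nm locs st := rfl
  rw [hrfl, hv]
  simp

lemma pvStep1Inner_cons_nomatch (n : Int) (nm : String) (l : PvLoc) (locs : List PvLoc)
    (st : List PvLoc × PySem.Set String) (hv : pv_is_valid_geo_target l = true)
    (hc : pvNameCond nm (pv_geo_id_name l).2 = false) :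
    pvStep1Inner n nm (l :: locs) st = pvStep1Inner n nm locs st := by
  have hrfl : pvStep1Inner n nm (l :: locs) st =
      if !pv_is_valid_geo_target l then pvStep1Inner n nm locs st
      else if pvNameCond nm (pv_geo_id_name l).2 then
        (if n ≤ ((pvBstep st l).1.length : Int) then Sum.inr (pvBstep st l).1
         else pvStep1Inner n nm locs (pvBstep st l))
      else pvStep1Inner n nm locs st := rfl
  rw [hrfl, hv, hc]
  simp

lemma pvStep1Inner_cons_true (n : Int) (nm : String) (l : PvLoc) (locs : List PvLoc)
    (st : List PvLoc × PySem.Set String) (hv : pv_is_valid_geo_target l = true)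
    (hc : pvNameCond nm (pv_geo_id_name l).2 = true) :
    pvStep1Inner n nm (l :: locs) st =
      if n ≤ ((pvBstep st l).1.length : Int) then Sum.inr (pvBstep st l).1
      else pvStep1Inner n nm locs (pvBstep st l) := by
  have hrfl : pvStep1Inner n nm (l :: locs) st =
      if !pv_is_valid_geo_target l then pvStep1Inner n nm locs st
      else if pvNameCond nm (pv_geo_id_name l).2 then
        (if n ≤ ((pvBstep st l).1.length : Int) then Sum.inr (pvBstep st l).1
         else pvStep1Inner n nm locs (pvBstep st l))
      else pvStep1Inner n nm locs st := rfl
  rw [hrfl, hv, hc]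
  simp

lemma pvStep2_cons_false (n : Int) (l : PvLoc) (locs : List PvLoc)
    (st : List PvLoc × PySem.Set String) (hv : pv_is_valid_geo_target l = false) :
    pvStep2 n (l :: locs) st = pvStep2 n locs st := by
  have hrfl : pvStep2 n (l :: locs) st =
      if !pv_is_valid_geo_target l then pvStep2 n locs st
      else (if n ≤ ((pvBstep st l).1.length : Int) then Sum.inr (pvBstep st l).1
            else pvStep2 n locs (pvBstep st l)) := rfl
  rw [hrfl, hv]
  simp

lemma pvStep2_cons_true (n : Int) (l : PvLoc) (locs : List PvLoc)
    (st : List PvLoc × PySem.Set String) (hv : pv_is_valid_geo_target l = true) :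
    pvStep2 n (l :: locs) st =
      if n ≤ ((pvBstep st l).1.length : Int) then Sum.inr (pvBstep st l).1
      else pvStep2 n locs (pvBstep st l) := by
  have hrfl : pvStep2 n (l :: locs) st =
      if !pv_is_valid_geo_target l then pvStep2 n locs st
      else (if n ≤ ((pvBstep st l).1.length : Int) then Sum.inr (pvBstep st l).1
            else pvStep2 n locs (pvBstep st l)) := rfl
  rw [hrfl, hv]
  simp

lemma pvStep3_cons (n : Int) (c : PvLoc) (cands : List PvLoc)
    (st : List PvLoc × PySem.Set String) :
    pvStep3 n (c :: cands) st =
      if n ≤ ((pvBstep st c).1.length : Int) then (pvBstep st c).1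
      else pvStep3 n cands (pvBstep st c) := rfl


-- basic state lemmas
lemma pvBstep_of_mem {st : List PvLoc × PySem.Set String} {l : PvLoc} (h : pvGid l ∈ st.2) :
    pvBstep st l = st := by
  have h' : (pv_geo_id_name l).1 ∈ st.2 := h
  simp [pvBstep, h']

lemma pvBstep_of_not_mem {st : List PvLoc × PySem.Set String} {l : PvLoc} (h : pvGid l ∉ st.2) :
    pvBstep st l = (st.1 ++ [l], PySem.Set.add st.2 (pvGid l)) := by
  have h' : (pv_geo_id_name l).1 ∉ st.2 := h
  simp [pvBstep, h', pvGid]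

lemma pvBstep_mono {x : String} (st : List PvLoc × PySem.Set String) (l : PvLoc) (h : x ∈ st.2) : x ∈ (pvBstep st l).2 := by
  by_cases hm : pvGid l ∈ st.2
  · rw [pvBstep_of_mem hm]; exact h
  · rw [pvBstep_of_not_mem hm]
    exact (PySem.Set.mem_add _ _ _).2 (Or.inl h)

lemma pvFoldl_mono {x : String} (s : List PvLoc) (st : List PvLoc × PySem.Set String) (h : x ∈ st.2) : x ∈ (s.foldl pvBstep st).2 := by
  induction s generalizing st with
  | nil => exact h
  | cons l s ih => exact ih _ (pvBstep_mono st l h)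

lemma pvGid_mem_foldl {l : PvLoc} (s : List PvLoc) (st : List PvLoc × PySem.Set String) (h : l ∈ s) : pvGid l ∈ (s.foldl pvBstep st).2 := by
  induction s generalizing st with
  | nil => cases h
  | cons a s ih =>
    rcases List.mem_cons.1 h with rfl | h'
    · refine pvFoldl_mono s _ ?_
      by_cases hm : pvGid l ∈ st.2
      · rw [pvBstep_of_mem hm]; exact hm
      · rw [pvBstep_of_not_mem hm]
        exact (PySem.Set.mem_add _ _ _).2 (Or.inr rfl)
    · exact ih _ h'

lemma pvFoldl_split (s : List PvLoc) (c : List PvLoc) (se : PySem.Set String) :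
    s.foldl pvBstep (c, se) = (c ++ (s.foldl pvBstep ([], se)).1, (s.foldl pvBstep ([], se)).2) := by
  induction s generalizing c se with
  | nil => simp
  | cons l s ih =>
    simp only [List.foldl_cons]
    by_cases hm : pvGid l ∈ se
    · have h1 : pvBstep (c, se) l = (c, se) := pvBstep_of_mem (st := (c, se)) hm
      have h2 : pvBstep (([] : List PvLoc), se) l = ([], se) := pvBstep_of_mem (st := (([] : List PvLoc), se)) hm
      rw [h1, h2, ih]
    · have h1 : pvBstep (c, se) l = (c ++ [l], PySem.Set.add se (pvGid l)) := pvBstep_of_not_mem (st := (c, se)) hm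
      have h2 : pvBstep (([] : List PvLoc), se) l = ([l], PySem.Set.add se (pvGid l)) := by
        rw [pvBstep_of_not_mem (st := (([] : List PvLoc), se)) hm]; rfl
      rw [h1, h2, ih, ih [l]]
      simp

-- chunk congruence: chunks with the same "new" elements process equally
lemma pvCongr (q r : PvLoc → Bool) (V : List PvLoc) :
    ∀ st : List PvLoc × PySem.Set String,
    (∀ l ∈ V, r l = true → q l = true) →
    (∀ l ∈ V, q l = true → r l = false → pvGid l ∈ st.2) →
    (V.filter q).foldl pvBstep st = (V.filter r).foldl pvBstep st := by
  induction V with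
  | nil => intro st _ _; rfl
  | cons l V ih =>
    intro st hsub hseen
    by_cases hq : q l = true
    · by_cases hr : r l = true
      · rw [List.filter_cons_of_pos hq, List.filter_cons_of_pos hr]
        simp only [List.foldl_cons]
        exact ih (pvBstep st l) (fun x hx => hsub x (List.mem_cons_of_mem _ hx))
          (fun x hx h1 h2 => pvBstep_mono _ _ (hseen x (List.mem_cons_of_mem _ hx) h1 h2))
      · have hr' : r l = false := by simpa using hr
        rw [List.filter_cons_of_pos hq, List.filter_cons_of_neg (by simp [hr'])]
        simp only [List.foldl_cons]
        have hmem : pvGid l ∈ st.2 := hseen l (List.mem_cons_self) hq hr'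
        rw [pvBstep_of_mem hmem]
        exact ih st (fun x hx => hsub x (List.mem_cons_of_mem _ hx))
          (fun x hx h1 h2 => hseen x (List.mem_cons_of_mem _ hx) h1 h2)
    · by_cases hr : r l = true
      · exact absurd (hsub l (List.mem_cons_self) hr) hq
      · rw [List.filter_cons_of_neg (by simpa using hq), List.filter_cons_of_neg (by simpa using hr)]
        exact ih st (fun x hx => hsub x (List.mem_cons_of_mem _ hx))
          (fun x hx h1 h2 => hseen x (List.mem_cons_of_mem _ hx) h1 h2)

-- ===== A reduces to pvProc on pvStreamA =====
lemma pvProc_append (n : Int) (a b : List PvLoc) (st : List PvLoc × PySem.Set String) :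
    pvProc n (a ++ b) st =
      match pvProc n a st with
      | .inl st' => pvProc n b st'
      | .inr r => .inr r := by
  induction a generalizing st with
  | nil => rfl
  | cons l a ih =>
    rw [List.cons_append, pvProc_cons, pvProc_cons]
    split
    · rfl
    · exact ih _

lemma pvStep1Inner_eq (n : Int) (nm : String) (locs : List PvLoc) (st : List PvLoc × PySem.Set String) :
    pvStep1Inner n nm locs st
      = pvProc n (locs.filter (fun l => pv_is_valid_geo_target l && pvNameCond nm (pv_geo_id_name l).2)) st := by
  induction locs generalizing st with
  | nil => rfl
  | cons l locs ih =>
    rcases hv : pv_is_valid_geo_target l with _ | _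
    · rw [pvStep1Inner_cons_false n nm l locs st hv, List.filter_cons_of_neg (by simp [hv])]
      exact ih st
    · rcases hc : pvNameCond nm (pv_geo_id_name l).2 with _ | _
      · rw [pvStep1Inner_cons_nomatch n nm l locs st hv hc,
          List.filter_cons_of_neg (by simp [hv, hc])]
        exact ih st
      · rw [pvStep1Inner_cons_true n nm l locs st hv hc,
          List.filter_cons_of_pos (by simp [hv, hc]), pvProc_cons]
        split
        · rfl
        · exact ih _

lemma pvStep2_eq (n : Int) (locs : List PvLoc) (st : List PvLoc × PySem.Set String) :
    pvStep2 n locs st = pvProc n (locs.filter pv_is_valid_geo_target) st := by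
  induction locs generalizing st with
  | nil => rfl
  | cons l locs ih =>
    rcases hv : pv_is_valid_geo_target l with _ | _
    · rw [pvStep2_cons_false n l locs st hv, List.filter_cons_of_neg (by simp [hv])]
      exact ih st
    · rw [pvStep2_cons_true n l locs st hv, List.filter_cons_of_pos hv, pvProc_cons]
      split
      · rfl
      · exact ih _

lemma pvStep3_eq (n : Int) (cands : List PvLoc) (st : List PvLoc × PySem.Set String) :
    pvStep3 n cands st = pvRes (pvProc n cands st) := by
  induction cands generalizing st with
  | nil => rfl
  | cons c cands ih =>
    rw [pvStep3_cons, pvProc_cons]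
    split
    · rfl
    · exact ih _

lemma pvBloop_eq (n : Int) (s : List PvLoc) (st : List PvLoc × PySem.Set String) :
    pvBloop n s st = pvRes (pvProc n s st) := by
  induction s generalizing st with
  | nil => rfl
  | cons l s ih =>
    show (if n ≤ ((pvBstep st l).1.length : Int) then (pvBstep st l).1 else pvBloop n s (pvBstep st l)) = _
    rw [pvProc_cons]
    split
    · rfl
    · exact ih _

lemma pvStep1_eq (n : Int) (L : List PvLoc) (names : List String) (st : List PvLoc × PySem.Set String) :
    pvStep1 n L names st
      = pvProc n (names.flatMap (fun nm => L.filter (fun l => pv_is_valid_geo_target l && pvNameCond nm (pv_geo_id_name l).2))) st := by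
  induction names generalizing st with
  | nil => rfl
  | cons nm names ih =>
    simp only [pvStep1, List.flatMap_cons, pvProc_append, pvStep1Inner_eq]
    rcases hp : pvProc n (L.filter (fun l => pv_is_valid_geo_target l && pvNameCond nm (pv_geo_id_name l).2)) st with st' | r
    · simpa using ih st'
    · rfl

-- for valid locations the name is a nonempty string
lemma pvValid_name {l : PvLoc} (h : pv_is_valid_geo_target l = true) :
    ∃ s : String, (pv_geo_id_name l).2 = some s ∧ (s == "") = false := by
  simp only [pv_is_valid_geo_target] at h
  rcases hg : PySem.Dict.get? (⟨l⟩ : PySem.Dict String (List (String × String))) "geoTargetConstant" with _ | g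
  · rw [hg] at h; simp at h
  · rw [hg] at h
    simp only [Bool.and_eq_true] at h
    obtain ⟨⟨-, -⟩, hn⟩ := h
    rcases hnm : PySem.Dict.get? (⟨g⟩ : PySem.Dict String String) "name" with _ | s
    · rw [hnm] at hn; simp [pvTruthy] at hn
    · refine ⟨s, ?_, ?_⟩
      · simp only [pv_geo_id_name, PySem.Dict.getD_eq_get?_getD, hg, Option.getD_some, hnm]
      · rw [hnm] at hn; simpa [pvTruthy] using hn

lemma pvChunkA_eq (L : List PvLoc) (p : String) :
    L.filter (fun l => pv_is_valid_geo_target l && pvNameCond p (pv_geo_id_name l).2)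
      = (pvV L).filter (fun l => PySem.Str.isIn (PySem.Str.lower p) (pvLname l)) := by
  unfold pvV
  rw [List.filter_filter]
  refine List.filter_congr ?_
  intro l _
  by_cases hv : pv_is_valid_geo_target l = true
  · obtain ⟨s, hs, hse⟩ := pvValid_name hv
    simp [hv, pvNameCond, hs, hse, pvLname]
  · simp [Bool.eq_false_iff.2 hv]

lemma pvA_eq (L : List PvLoc) (n : Int) :
    choose_fallback_locations L n = pvRes (pvProc n (pvStreamA L) pvInit) := by
  have hC : pvPriorityNames.flatMap
      (fun nm => L.filter (fun l => pv_is_valid_geo_target l && pvNameCond nm (pv_geo_id_name l).2))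
      = (List.range 6).flatMap (pvSA L) := by
    have hr6 : List.range 6 = [0, 1, 2, 3, 4, 5] := by decide
    simp only [hr6, pvPriorityNames, List.flatMap_cons, List.flatMap_nil, List.append_nil]
    simp only [pvChunkA_eq, pvSA]
    rfl
  unfold choose_fallback_locations
  rw [pvStep1_eq, hC]
  unfold pvStreamA pvV pvInit
  rw [pvProc_append, pvProc_append]
  rcases pvProc n ((List.range 6).flatMap (pvSA L)) ([], PySem.Set.empty) with st1 | r
  · dsimp only
    rw [pvStep2_eq]
    rcases pvProc n (L.filter pv_is_valid_geo_target) st1 with st2 | r2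
    · exact pvStep3_eq n pvGenericCandidates st2
    · rfl
  · rfl

-- ===== B reduces to pvProc on pvStreamB =====
lemma pvRankLoop_spec (s : String) : ∀ (ps : List String) (k d : Int),
    pvRankLoop s (PySem.List.enumerate ps k) d =
      if (ps.findIdx (fun p => PySem.Str.isIn p s)) < ps.length
      then k + ((ps.findIdx (fun p => PySem.Str.isIn p s) : Nat) : Int)
      else d := by
  intro ps
  induction ps with
  | nil => intro k d; simp [pvRankLoop, PySem.List.enumerate_nil]
  | cons p ps ih =>
    intro k d
    rw [PySem.List.enumerate_cons]
    rcases hp : PySem.Str.isIn p s with _ | _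
    · show (if PySem.Str.isIn p s = true then k else pvRankLoop s (PySem.List.enumerate ps (k + 1)) d) = _
      rw [if_neg (by rw [hp]; exact Bool.false_ne_true), ih (k + 1) d, List.findIdx_cons, hp]
      simp only [cond_false, List.length_cons]
      by_cases hlt : List.findIdx (fun p => PySem.Str.isIn p s) ps < ps.length
      · rw [if_pos hlt, if_pos (by omega)]
        push_cast
        ring
      · rw [if_neg hlt, if_neg (by omega)]
    · show (if PySem.Str.isIn p s = true then k else pvRankLoop s (PySem.List.enumerate ps (k + 1)) d) = _
      rw [if_pos hp, List.findIdx_cons, hp]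
      simp

lemma pvRank_eq (l : PvLoc) :
    pvRankLoop (pvLname l) (PySem.List.enumerate pvLow 0) ((pvLow.length : Int)) = ((pvRankN l : Nat) : Int) := by
  rw [pvRankLoop_spec]
  by_cases hlt : pvLow.findIdx (fun p => PySem.Str.isIn p (pvLname l)) < pvLow.length
  · rw [if_pos hlt]
    simp [pvRankN]
  · rw [if_neg hlt]
    have h1 : pvLow.findIdx (fun p => PySem.Str.isIn p (pvLname l)) ≤ pvLow.length :=
      List.findIdx_le_length
    have h2 : pvRankN l = pvLow.length := by unfold pvRankN; omega
    rw [h2]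

lemma pvChunkB_eq (L : List PvLoc) (i : Nat) :
    ((((pvV L).map (fun l => ((pvRankN l : Int), l))).filter (fun p => p.1 == ((i : Nat) : Int))).map (fun p => p.2)) = pvSBn L i := by
  rw [List.filter_map, List.map_map]
  have hid : ((fun p : Int × PvLoc => p.2) ∘ (fun l => ((pvRankN l : Int), l))) = id := rfl
  rw [hid, List.map_id]
  unfold pvSBn
  refine List.filter_congr ?_
  intro l _
  simp [Function.comp]

lemma pvLow_length : pvLow.length = 6 := by simp [pvLow, pvPriorityNames]

lemma pvB_eq (L : List PvLoc) (n : Int) :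
    choose_fallback_locations_alt L n = pvRes (pvProc n (pvStreamB L) pvInit) := by
  unfold choose_fallback_locations_alt
  simp only [PySem.List.foldl_append_if, List.nil_append]
  have hlow : pvPriorityNames.map PySem.Str.lower = pvLow := rfl
  rw [hlow]
  have hrk : (L.filter pv_is_valid_geo_target).map
        (fun loc => (pvRankLoop (PySem.Str.lower ((pv_geo_id_name loc).2.getD ""))
          (PySem.List.enumerate pvLow 0) ((pvLow.length : Int)), loc))
      = (pvV L).map (fun l => ((pvRankN l : Int), l)) := by
    unfold pvV
    refine List.map_congr_left ?_
    intro l _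
    have := pvRank_eq l
    rw [show PySem.Str.lower ((pv_geo_id_name l).2.getD "") = pvLname l from rfl, this]
  rw [hrk]
  have hlen6 : ((pvLow.length : Nat) : Int) = 6 := by rw [pvLow_length]; rfl
  rw [hlen6]
  have hpr : PySem.List.pyRange 0 ((6 : Int) + 1) 1 = (List.range 7).map (Nat.cast) := by decide
  rw [hpr, List.flatMap_map]
  have hflat : (List.range 7).flatMap
      (fun i => (((pvV L).map (fun l => ((pvRankN l : Int), l))).filter (fun p => p.1 == ((i : Nat) : Int))).map (fun p => p.2))
      = (List.range 7).flatMap (pvSBn L) := by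
    refine List.flatMap_congr ?_
    intro i _
    exact pvChunkB_eq L i
  rw [hflat, pvBloop_eq]
  rfl

-- ===== the two streams dedup-process equally =====
lemma pvRank_le (l : PvLoc) : pvRankN l ≤ 6 := by
  have h := List.findIdx_le_length (p := fun p => PySem.Str.isIn p (pvLname l)) (xs := pvLow)
  have h2 := pvLow_length
  unfold pvRankN
  omega

lemma pvRank_match {l : PvLoc} {i : Nat} (hi : i < 6) (h : pvRankN l = i) :
    PySem.Str.isIn (pvLow.getD i "") (pvLname l) = true := by
  have hi' : i < pvLow.length := by rw [pvLow_length]; exact hi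
  have hch := (List.findIdx_eq (p := fun p => PySem.Str.isIn p (pvLname l)) hi').1 h
  rw [List.getD_eq_getElem _ _ hi']
  exact hch.1

lemma pvMatch_rank_le {l : PvLoc} {i : Nat} (hi : i < 6)
    (h : PySem.Str.isIn (pvLow.getD i "") (pvLname l) = true) : pvRankN l ≤ i := by
  have hi' : i < pvLow.length := by rw [pvLow_length]; exact hi
  rw [List.getD_eq_getElem _ _ hi'] at h
  by_contra hgt
  rw [not_le] at hgt
  have hex : pvRankN l < pvLow.length := by
    unfold pvRankN
    exact List.findIdx_lt_length_of_exists ⟨pvLow[i], List.getElem_mem hi', h⟩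
  have hch := (List.findIdx_eq (p := fun p => PySem.Str.isIn p (pvLname l)) hex).1 rfl
  have := hch.2 i hgt
  rw [h] at this
  cases this

lemma pvCongr' (r : PvLoc → Bool) (V : List PvLoc) :
    ∀ st : List PvLoc × PySem.Set String,
    (∀ l ∈ V, r l = false → pvGid l ∈ st.2) →
    V.foldl pvBstep st = (V.filter r).foldl pvBstep st := by
  induction V with
  | nil => intro st _; rfl
  | cons l V ih =>
    intro st hseen
    by_cases hr : r l = true
    · rw [List.filter_cons_of_pos hr]
      simp only [List.foldl_cons]
      exact ih (pvBstep st l) (fun x hx h1 => pvBstep_mono _ _ (hseen x (List.mem_cons_of_mem _ hx) h1))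
    · have hr' : r l = false := by simpa using hr
      rw [List.filter_cons_of_neg (by simp [hr'])]
      simp only [List.foldl_cons]
      rw [pvBstep_of_mem (hseen l (List.mem_cons_self) hr')]
      exact ih st (fun x hx h1 => hseen x (List.mem_cons_of_mem _ hx) h1)

lemma pvMain (L : List PvLoc) :
    ∀ k : Nat, k ≤ 6 →
      (((List.range k).flatMap (pvSA L)).foldl pvBstep pvInit
          = ((List.range k).flatMap (pvSBn L)).foldl pvBstep pvInit)
      ∧ ∀ l ∈ pvV L, pvRankN l < k →
          pvGid l ∈ (((List.range k).flatMap (pvSBn L)).foldl pvBstep pvInit).2 := by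
  intro k
  induction k with
  | zero =>
    intro _
    refine ⟨by simp, ?_⟩
    intro l _ h
    omega
  | succ k ih =>
    intro hk
    obtain ⟨heq, hinv⟩ := ih (by omega)
    have hk6 : k < 6 := by omega
    have hstep :
        ((pvSA L k).foldl pvBstep (((List.range k).flatMap (pvSBn L)).foldl pvBstep pvInit))
          = ((pvSBn L k).foldl pvBstep (((List.range k).flatMap (pvSBn L)).foldl pvBstep pvInit)) := by
      unfold pvSA pvSBn
      refine pvCongr _ _ (pvV L) _ ?_ ?_
      · intro l _ hr
        have : pvRankN l = k := by simpa using hr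
        exact pvRank_match hk6 this
      · intro l hl hq hr
        have hne : pvRankN l ≠ k := by simpa using hr
        have hle : pvRankN l ≤ k := pvMatch_rank_le hk6 hq
        exact hinv l hl (by omega)
    constructor
    · rw [List.range_succ, List.flatMap_append, List.flatMap_append,
        List.foldl_append, List.foldl_append, heq]
      simpa using hstep
    · intro l hl hlt
      rw [List.range_succ, List.flatMap_append, List.foldl_append]
      rcases Nat.lt_succ_iff_lt_or_eq.1 hlt with h | h
      · exact pvFoldl_mono _ _ (hinv l hl h)
      · have hmem : l ∈ pvSBn L k := by
          unfold pvSBn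
          exact List.mem_filter.2 ⟨hl, by simp [h]⟩
        refine pvGid_mem_foldl _ _ ?_
        simpa using hmem

lemma pvStreams_eq (L : List PvLoc) :
    (pvStreamA L).foldl pvBstep pvInit = (pvStreamB L).foldl pvBstep pvInit := by
  obtain ⟨heq, hinv⟩ := pvMain L 6 (le_refl _)
  unfold pvStreamA pvStreamB
  have h7 : List.range 7 = List.range 6 ++ [6] := List.range_succ
  rw [h7, List.flatMap_append, List.foldl_append, List.foldl_append, List.foldl_append,
    List.foldl_append, heq]
  congr 1
  rw [show List.flatMap (pvSBn L) [6] = pvSBn L 6 from by simp]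
  unfold pvSBn
  refine pvCongr' _ (pvV L) _ ?_
  intro l hl hr
  have hne : pvRankN l ≠ 6 := by simpa using hr
  have h6 := pvRank_le l
  exact hinv l hl (by omega)

-- ===== the early-return processor is a take of the full fold =====
lemma pvBstep_len (st : List PvLoc × PySem.Set String) (l : PvLoc) :
    (pvBstep st l).1.length = st.1.length ∨ (pvBstep st l).1.length = st.1.length + 1 := by
  by_cases hm : pvGid l ∈ st.2
  · rw [pvBstep_of_mem hm]; left; rfl
  · rw [pvBstep_of_not_mem hm]; right; simp

lemma pvProc_take (n : Int) :
    ∀ (s : List PvLoc) (st : List PvLoc × PySem.Set String), (st.1.length : Int) < n →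
      pvRes (pvProc n s st) = (s.foldl pvBstep st).1.take n.toNat := by
  intro s
  induction s with
  | nil =>
    intro st h
    simp only [pvProc, pvRes, List.foldl_nil]
    rw [List.take_of_length_le (by omega)]
  | cons l s ih =>
    intro st h
    rw [pvProc_cons, List.foldl_cons]
    by_cases hle : n ≤ ((pvBstep st l).1.length : Int)
    · rw [if_pos hle]
      have hlen : (pvBstep st l).1.length = n.toNat := by
        rcases pvBstep_len st l with h1 | h1 <;> omega
      show (pvBstep st l).1 = _
      rw [show pvBstep st l = ((pvBstep st l).1, (pvBstep st l).2) from rfl, pvFoldl_split]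
      exact (List.take_left' hlen).symm
    · rw [if_neg hle]
      have hlt : (((pvBstep st l).1.length : Nat) : Int) < n := by omega
      exact ih _ hlt

lemma pvProc_nonpos (n : Int) (hn : n ≤ 0) (l : PvLoc) (s : List PvLoc) :
    pvRes (pvProc n (l :: s) pvInit) = ((l :: s).foldl pvBstep pvInit).1.take 1 := by
  have hgid : pvGid l ∉ (pvInit).2 := List.not_mem_nil
  have h1 : pvBstep pvInit l = ([l], PySem.Set.add PySem.Set.empty (pvGid l)) := by
    rw [pvBstep_of_not_mem hgid]; rfl
  rw [pvProc_cons, List.foldl_cons, h1]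
  rw [if_pos (by simp; omega)]
  show [l] = _
  rw [pvFoldl_split]
  rw [List.take_left' (l₁ := [l]) (by simp)]

lemma pvStreamA_ne_nil (L : List PvLoc) : pvStreamA L ≠ [] := by
  simp [pvStreamA, pvGenericCandidates]

lemma pvStreamB_ne_nil (L : List PvLoc) : pvStreamB L ≠ [] := by
  simp [pvStreamB, pvGenericCandidates]

theorem pv_main_theorem (L : List PvLoc) (n : Int) :
    choose_fallback_locations L n = choose_fallback_locations_alt L n := by
  rw [pvA_eq, pvB_eq]
  by_cases hn : n ≤ 0
  · rcases hA : pvStreamA L with _ | ⟨la, sa⟩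
    · exact absurd hA (pvStreamA_ne_nil L)
    · rcases hB : pvStreamB L with _ | ⟨lb, sb⟩
      · exact absurd hB (pvStreamB_ne_nil L)
      · rw [pvProc_nonpos n hn la sa, pvProc_nonpos n hn lb sb, ← hA, ← hB, pvStreams_eq]
  · rw [not_le] at hn
    rw [pvProc_take n _ pvInit (by simp [pvInit]; omega),
      pvProc_take n _ pvInit (by simp [pvInit]; omega), pvStreams_eq]

-- ===== VERDICT (by name: the statement is the Claim_ definition above) =====
theorem choose_fallback_locations_spec : Claim_equal_choose_fallback_locations := by
  intro L n _
  unfold Spec_choose_fallback_locations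
  exact pv_main_theorem L n
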